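-- pv_equiv track=rewrite | github.com/15five/scim2-filter-parser | tests/test_lexer.py | get_op_permutation
-- ===== SOURCE A (Python) =====
-- def get_op_permutation(op_code):
--     """
--     Get all the capitalization permutations for a specific op_code.
--     """
--     permuations = []
--     for i in range(2 ** len(op_code)):
--         # use bits as indices to capitalize
--         mask = str(bin(i)).replace('0b', '').zfill(len(op_code))
--
--         permuation = ''
--         for j, char in enumerate(op_code):
--             if mask[j:j+1] == '1':
--                 permuation += char.upper()
--             else:
--                 permuation += char.lower()
--
--         permuations.append(permuation)
--
--     return permuations
-- ===== SOURCE B (Python) =====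
-- def get_op_permutation(op_code):
--     """
--     Get all the capitalization permutations for a specific op_code.
--
--     Iterative Cartesian-product expansion: start from [''] and for each
--     character append its lowercase and uppercase variants to every prefix
--     built so far (lowercase first, so the order matches binary counting
--     with the first character as the most significant bit).
--     """
--     results = ['']
--     for char in op_code:
--         lo, up = char.lower(), char.upper()
--         results = [prefix + case for prefix in results for case in (lo, up)]
--     return results
-- ===== Notes on version B (the rewrite author's own statement) =====
-- stated objective: alternative
-- what changed: Replaces the binary-counter loop that formats each i with bin()/zfill() and decodes the mask per character by an iterative Cartesian-product expansion that grows the result list one character at a time (lowercase variant first, matching the original's bit order).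
import Mathlib
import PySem

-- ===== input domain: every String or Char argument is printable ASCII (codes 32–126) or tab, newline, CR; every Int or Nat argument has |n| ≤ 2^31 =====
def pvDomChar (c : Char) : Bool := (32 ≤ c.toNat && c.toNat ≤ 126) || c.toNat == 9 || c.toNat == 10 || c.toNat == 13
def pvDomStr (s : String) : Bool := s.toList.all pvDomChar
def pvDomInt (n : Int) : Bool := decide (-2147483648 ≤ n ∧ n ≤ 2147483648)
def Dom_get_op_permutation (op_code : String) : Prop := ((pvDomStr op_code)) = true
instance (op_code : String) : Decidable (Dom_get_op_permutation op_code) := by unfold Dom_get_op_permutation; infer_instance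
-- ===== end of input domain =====

-- B replaces A's binary-counter/bin()-zfill mask decoding by an iterative Cartesian-product
-- expansion of the result list (alternative algorithm, same exact output order).

-- ===== PORT A =====
-- literal port of A: count i in range(2**len), format i with bin()/replace/zfill,
-- decode the mask character by character (char.upper()/.lower() on a single ASCII
-- char is PySem.Chars.upperChar/lowerChar — exact on the ASCII domain).
def get_op_permutation (op_code : String) : List String :=
  (PySem.List.pyRange 0 ((2 : Int) ^ op_code.toList.length) 1).foldl
    (fun permuations i =>
      let mask : List Char :=
        PySem.Chars.zfill (PySem.Chars.replace (PySem.Int.toBinChars0b i) ['0', 'b'] [])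
          (PySem.Str.len op_code)
      let permuation : List Char :=
        (PySem.List.enumerate op_code.toList 0).foldl
          (fun permuation jc =>
            if PySem.List.slice mask (some jc.1) (some (jc.1 + 1)) = ['1'] then
              permuation ++ [PySem.Chars.upperChar jc.2]
            else
              permuation ++ [PySem.Chars.lowerChar jc.2])
          []
      permuations ++ [String.mk permuation])
    []

-- ===== PORT B =====
-- literal port of B: results = ['']; for each char, every prefix is extended by its
-- lowercase then uppercase variant.
def get_op_permutation_alt (op_code : String) : List String :=
  (op_code.toList.foldl
    (fun results c =>
      results.flatMap (fun pre =>
        [pre ++ [PySem.Chars.lowerChar c], pre ++ [PySem.Chars.upperChar c]]))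
    ([[]] : List (List Char))).map String.mk

-- ===== PRECONDITION & SPEC =====
def Spec_get_op_permutation (op_code : String) (out : List String) : Prop := out = get_op_permutation_alt op_code
instance (op_code : String) (out : List String) : Decidable (Spec_get_op_permutation op_code out) := by unfold Spec_get_op_permutation; infer_instance

-- ===== CLAIM (what is proved, stated in full; the proofs are below) =====
def Claim_equal_get_op_permutation : Prop := ∀ (op_code : String), Dom_get_op_permutation op_code → Spec_get_op_permutation op_code (get_op_permutation op_code)

-- ===== LEMMAS AND PROOFS =====

-- ---- proof-side abbreviations ----

/-- The mask A computes for counter value `m` and width `n`, after `bin`/`replace`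
are reduced to `Nat.toDigits 2`. -/
def pvMaskN (n m : Nat) : List Char :=
  PySem.Chars.zfill (Nat.toDigits 2 m) (n : Int)

/-- The per-character case decision of A, expressed positionally. -/
def pvCase (mask : List Char) (p : Char × Nat) : Char :=
  if mask[p.2]? = some '1' then PySem.Chars.upperChar p.1 else PySem.Chars.lowerChar p.1

/-- B's expansion step. -/
def pvStepB (results : List (List Char)) (c : Char) : List (List Char) :=
  results.flatMap (fun pre =>
    [pre ++ [PySem.Chars.lowerChar c], pre ++ [PySem.Chars.upperChar c]])

-- ---- Nat.toDigits facts ----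

theorem pv_tdc_append (fuel : Nat) : ∀ (n : Nat) (ds : List Char),
    Nat.toDigitsCore 2 fuel n ds = Nat.toDigitsCore 2 fuel n [] ++ ds := by
  induction fuel with
  | zero => intro n ds; simp [Nat.toDigitsCore]
  | succ f ih =>
    intro n ds
    simp only [Nat.toDigitsCore]
    by_cases h : n / 2 = 0
    · simp [h]
    · simp only [h, if_false]
      rw [ih (n / 2) (Nat.digitChar (n % 2) :: ds), ih (n / 2) [Nat.digitChar (n % 2)]]
      simp

theorem pv_tdc_fuel (n : Nat) : ∀ (f1 f2 : Nat), n < f1 → n < f2 →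
    Nat.toDigitsCore 2 f1 n [] = Nat.toDigitsCore 2 f2 n [] := by
  induction n using Nat.strong_induction_on with
  | _ n ih =>
    intro f1 f2 h1 h2
    obtain ⟨g1, rfl⟩ : ∃ g, f1 = g + 1 := ⟨f1 - 1, by omega⟩
    obtain ⟨g2, rfl⟩ : ∃ g, f2 = g + 1 := ⟨f2 - 1, by omega⟩
    simp only [Nat.toDigitsCore]
    by_cases h : n / 2 = 0
    · simp [h]
    · simp only [h, if_false]
      rw [pv_tdc_append g1, pv_tdc_append g2]
      have hlt : n / 2 < n := Nat.div_lt_self (by omega) (by omega)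
      rw [ih (n / 2) hlt g1 g2 (by omega) (by omega)]

theorem pv_digits_mem (fuel : Nat) : ∀ (n : Nat) (ds : List Char),
    (∀ c ∈ ds, c = '0' ∨ c = '1') →
    ∀ c ∈ Nat.toDigitsCore 2 fuel n ds, c = '0' ∨ c = '1' := by
  induction fuel with
  | zero => intro n ds hds; simpa [Nat.toDigitsCore] using hds
  | succ f ih =>
    intro n ds hds
    have hd : Nat.digitChar (n % 2) = '0' ∨ Nat.digitChar (n % 2) = '1' := by
      have : n % 2 = 0 ∨ n % 2 = 1 := by omega
      rcases this with h | h <;> rw [h] <;> simp [Nat.digitChar]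
    simp only [Nat.toDigitsCore]
    by_cases h : n / 2 = 0
    · simp only [h, if_true]
      intro c hc
      rcases List.mem_cons.mp hc with rfl | hc
      · exact hd
      · exact hds c hc
    · simp only [h, if_false]
      exact ih (n / 2) _ (by
        intro c hc
        rcases List.mem_cons.mp hc with rfl | hc
        · exact hd
        · exact hds c hc)

theorem pv_toDigits_mem (m : Nat) : ∀ c ∈ Nat.toDigits 2 m, c = '0' ∨ c = '1' :=
  pv_digits_mem (m + 1) m [] (by simp)

theorem pv_toDigits_ne_nil (m : Nat) : Nat.toDigits 2 m ≠ [] := by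
  unfold Nat.toDigits
  simp only [Nat.toDigitsCore]
  by_cases h : m / 2 = 0
  · simp [h]
  · simp only [h, if_false]
    rw [pv_tdc_append]
    simp

theorem pv_toDigits_step (q r : Nat) (hq : 1 ≤ q) (hr : r < 2) :
    Nat.toDigits 2 (2 * q + r) = Nat.toDigits 2 q ++ [Nat.digitChar r] := by
  unfold Nat.toDigits
  conv_lhs => rw [Nat.toDigitsCore]
  have hmod : (2 * q + r) % 2 = r := by omega
  have hdiv : (2 * q + r) / 2 = q := by omega
  simp only [hmod, hdiv]
  have hq0 : q ≠ 0 := by omega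
  simp only [hq0, if_false]
  rw [pv_tdc_append]
  rw [pv_tdc_fuel q (2 * q + r) (q + 1) (by omega) (by omega)]

-- ---- replace '0b' ----

theorem pv_replace_go (l : List Char) : ∀ (fuel : Nat) (acc : List Char), 'b' ∉ l →
    PySem.Chars.replace.go ['0', 'b'] [] fuel l acc = acc.reverse ++ l := by
  induction l with
  | nil => intro fuel acc _; cases fuel <;> simp [PySem.Chars.replace.go]
  | cons c t ih =>
    intro fuel acc hb
    cases fuel with
    | zero => simp [PySem.Chars.replace.go]
    | succ f =>
      have hpre : (['0', 'b'].isPrefixOf (c :: t)) = false := by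
        by_contra h
        have h' : ['0', 'b'] <+: (c :: t) :=
          List.isPrefixOf_iff_prefix.mp (by revert h; cases (['0', 'b'].isPrefixOf (c :: t)) <;> simp)
        have : 'b' ∈ c :: t := h'.sublist.mem (by simp)
        exact hb this
      simp only [PySem.Chars.replace.go, hpre]
      rw [ih f (c :: acc) (by intro h; exact hb (List.mem_cons_of_mem _ h))]
      simp

theorem pv_replace_0b (m : Nat) :
    PySem.Chars.replace (PySem.Int.toBinChars0b (m : Int)) ['0', 'b'] [] = Nat.toDigits 2 m := by
  have hnb : 'b' ∉ Nat.toDigits 2 m := by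
    intro h
    rcases pv_toDigits_mem m 'b' h with h' | h' <;> simp at h'
  have h0b : PySem.Int.toBinChars0b (m : Int) = '0' :: 'b' :: Nat.toDigits 2 m := by
    simp [PySem.Int.toBinChars0b]
  rw [h0b]
  show PySem.Chars.replace _ _ _ = _
  rw [PySem.Chars.replace]
  simp only [List.isEmpty_cons]
  have hlen : ('0' :: 'b' :: Nat.toDigits 2 m).length = (Nat.toDigits 2 m).length + 2 := by simp
  rw [hlen]
  rw [PySem.Chars.replace.go]
  have hpre : (['0', 'b'].isPrefixOf ('0' :: 'b' :: Nat.toDigits 2 m)) = true := by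
    apply List.isPrefixOf_iff_prefix.mpr
    exact ⟨Nat.toDigits 2 m, rfl⟩
  simp only [hpre, if_true, Bool.false_eq_true, if_false, List.length_cons,
    List.drop_succ_cons, List.drop_zero, List.length_nil, List.reverse_nil, List.nil_append, List.append_nil]
  rw [pv_replace_go _ _ _ hnb]
  simp

-- ---- zfill ----

theorem pv_zfill_eq (u : List Char) (n : Nat) (hne : u ≠ [])
    (hhead : ∀ c, u.head? = some c → c ≠ '+' ∧ c ≠ '-') :
    PySem.Chars.zfill u (n : Int) = List.replicate (n - u.length) '0' ++ u := by
  rw [PySem.Chars.zfill.eq_def]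
  by_cases h : (n : Int) ≤ (u.length : Int)
  · have : n - u.length = 0 := by omega
    simp [h, this]
  · simp only [h, if_false]
    cases u with
    | nil => exact absurd rfl hne
    | cons c rest =>
      have hc := hhead c (by simp)
      have hcc : ¬ (c = '+' ∨ c = '-') := by
        rintro (rfl | rfl) <;> simp at hc
      simp only [hcc, if_false]
      have : ((n : Int)).toNat = n := by omega
      rw [this]

theorem pv_maskN_length (n m : Nat) (hm : m < 2 ^ n) (hn : 0 < n) :
    (pvMaskN n m).length = n := by
  unfold pvMaskN
  rw [PySem.Chars.length_zfill]
  have := Nat.toDigits_length 2 m n hn hm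
  simp only [Int.toNat_natCast]
  omega

-- the two mask-position facts the induction step needs
theorem pv_mask_pos (n q r : Nat) (hq : q < 2 ^ n) (hr : r < 2) :
    (∀ j, j < n → (pvMaskN (n + 1) (2 * q + r))[j]? = (pvMaskN n q)[j]?) ∧
      (pvMaskN (n + 1) (2 * q + r))[n]? = some (Nat.digitChar r) := by
  by_cases hq1 : 1 ≤ q
  · -- q ≥ 1 : mask (n+1) (2q+r) = mask n q ++ [digit r]
    have hn : 0 < n := by
      by_contra h
      have : n = 0 := by omega
      subst this; simp at hq; omega
    have hlen : (Nat.toDigits 2 q).length ≤ n := Nat.toDigits_length 2 q n hn hq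
    have hheadfacts : ∀ (u : List Char), (∀ c ∈ u, c = '0' ∨ c = '1') →
        ∀ c, u.head? = some c → c ≠ '+' ∧ c ≠ '-' := by
      intro u hu c hc
      have : c ∈ u := by
        cases u with
        | nil => simp at hc
        | cons a t => simp at hc; simp [hc]
      rcases hu c this with rfl | rfl <;> exact ⟨by decide, by decide⟩
    have hdig : ∀ c ∈ Nat.toDigits 2 q ++ [Nat.digitChar r], c = '0' ∨ c = '1' := by
      intro c hc
      rcases List.mem_append.mp hc with h | h
      · exact pv_toDigits_mem q c h
      · simp at h
        subst h
        have : r = 0 ∨ r = 1 := by omega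
        rcases this with rfl | rfl <;> simp [Nat.digitChar]
    have heq : pvMaskN (n + 1) (2 * q + r) = pvMaskN n q ++ [Nat.digitChar r] := by
      unfold pvMaskN
      rw [pv_toDigits_step q r hq1 hr]
      rw [pv_zfill_eq _ _ (by simp) (hheadfacts _ hdig)]
      rw [pv_zfill_eq _ _ (pv_toDigits_ne_nil q)
        (hheadfacts _ (pv_toDigits_mem q))]
      simp only [List.length_append, List.length_cons, List.length_nil, List.append_assoc]
      congr 2
      omega
    have hmlen : (pvMaskN n q).length = n := pv_maskN_length n q hq hn
    constructor
    · intro j hj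
      rw [heq, List.getElem?_append_left (by omega)]
    · rw [heq, List.getElem?_append_right (by omega), hmlen]
      simp
  · -- q = 0 : both masks are all '0' below n; position n is digit r
    have hq0 : q = 0 := by omega
    subst hq0
    have h2 : pvMaskN (n + 1) r = List.replicate n '0' ++ [Nat.digitChar r] := by
      unfold pvMaskN
      have ht : Nat.toDigits 2 r = [Nat.digitChar r] := by
        have : r = 0 ∨ r = 1 := by omega
        rcases this with rfl | rfl <;> rfl
      rw [ht, pv_zfill_eq _ _ (by simp) (by
        intro c hc
        simp at hc
        subst hc
        have : r = 0 ∨ r = 1 := by omega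
        rcases this with rfl | rfl <;> exact ⟨by decide, by decide⟩)]
      simp
    constructor
    · intro j hj
      have hlhs : (pvMaskN (n + 1) (2 * 0 + r))[j]? = some '0' := by
        rw [show 2 * 0 + r = r by omega, h2]
        rw [List.getElem?_append_left (by simp; omega)]
        simp [hj]
      have hrhs : (pvMaskN n 0)[j]? = some '0' := by
        have hform : pvMaskN n 0 = List.replicate (n - 1) '0' ++ ['0'] := by
          unfold pvMaskN
          have ht : Nat.toDigits 2 0 = ['0'] := rfl
          rw [ht, pv_zfill_eq _ _ (by simp) (by intro c hc; simp at hc; subst hc; exact ⟨by decide, by decide⟩)]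
          simp
        rw [hform]
        by_cases hjn : j < n - 1
        · rw [List.getElem?_append_left (by simpa using hjn)]
          simp [hjn]
        · have hj1 : j = n - 1 := by omega
          subst hj1
          rw [List.getElem?_append_right (by simp)]
          simp
      rw [hlhs, hrhs]
    · rw [show 2 * 0 + r = r by omega, h2]
      rw [List.getElem?_append_right (by simp)]
      simp

-- ---- slices as getElem? ----

theorem pv_take_one_drop {α : Type} (xs : List α) (k : Nat) :
    (xs.drop k).take 1 = (xs[k]?).toList := by
  induction xs generalizing k with
  | nil => simp
  | cons x t ih =>
    cases k with
    | zero => simp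
    | succ k' => simpa using ih k'

theorem pv_slice_one {α : Type} (xs : List α) (k : Nat) :
    PySem.List.slice xs (some (k : Int)) (some ((k : Int) + 1)) = (xs[k]?).toList := by
  rw [PySem.List.slice_toNat xs (by positivity) (by positivity)]
  have h1 : ((k : Int) + 1).toNat = k + 1 := by omega
  have h2 : ((k : Int)).toNat = k := by omega
  rw [h1, h2]
  have : k + 1 - k = 1 := by omega
  rw [this]
  exact pv_take_one_drop xs k

theorem pv_slice_cond (mask : List Char) (k : Nat) :
    (PySem.List.slice mask (some (k : Int)) (some ((k : Int) + 1)) = ['1'])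
      = (mask[k]? = some '1') := by
  rw [pv_slice_one]
  cases h : mask[k]? <;> simp

-- ---- A's inner loop as a zipIdx map ----

theorem pv_flatMap_singleton {α β : Type} (f : α → β) (l : List α) :
    l.flatMap (fun x => [f x]) = l.map f := by
  induction l with
  | nil => rfl
  | cons a t ih => simp [List.flatMap_cons, ih]

theorem pv_decode_eq (mask : List Char) (cs : List Char) :
    (PySem.List.enumerate cs 0).foldl
        (fun permuation jc =>
          if PySem.List.slice mask (some jc.1) (some (jc.1 + 1)) = ['1'] then
            permuation ++ [PySem.Chars.upperChar jc.2]
          else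
            permuation ++ [PySem.Chars.lowerChar jc.2])
        []
      = cs.zipIdx.map (pvCase mask) := by
  rw [PySem.List.enumerate_eq_zipIdx_map, List.foldl_map]
  have : ∀ (p : Char × Nat) (acc : List Char),
      (if PySem.List.slice mask (some ((0 : Int) + (p.2 : Int))) (some ((0 : Int) + (p.2 : Int) + 1)) = ['1'] then
        acc ++ [PySem.Chars.upperChar p.1]
      else acc ++ [PySem.Chars.lowerChar p.1]) = acc ++ [pvCase mask p] := by
    intro p acc
    simp only [show (0 : Int) + (p.2 : Int) = (p.2 : Int) by ring, pv_slice_cond]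
    unfold pvCase
    split_ifs <;> rfl
  calc cs.zipIdx.foldl
        (fun acc p =>
          if PySem.List.slice mask (some ((0 : Int) + (p.2 : Int))) (some ((0 : Int) + (p.2 : Int) + 1)) = ['1'] then
            acc ++ [PySem.Chars.upperChar p.1]
          else acc ++ [PySem.Chars.lowerChar p.1]) []
      = cs.zipIdx.foldl (fun acc p => acc ++ [pvCase mask p]) [] := by
        apply PySem.List.foldl_congr_mem
        intro acc p _
        exact this p acc
    _ = cs.zipIdx.map (pvCase mask) := by
        rw [PySem.List.foldl_append_eq_flatMap (fun p => [pvCase mask p])]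
        rw [List.nil_append, pv_flatMap_singleton]

-- ---- range doubling ----

theorem pv_range_double (m : Nat) :
    List.range (2 * m) = (List.range m).flatMap (fun q => [2 * q, 2 * q + 1]) := by
  induction m with
  | zero => simp
  | succ m' ih =>
    have h : 2 * (m' + 1) = (2 * m' + 1) + 1 := by omega
    rw [h, List.range_succ, show 2 * m' + 1 = (2 * m').succ from rfl, List.range_succ, ih,
      List.range_succ, List.flatMap_append]
    simp

-- ---- the main induction ----

theorem pv_main (cs : List Char) :
    (List.range (2 ^ cs.length)).map
        (fun m => cs.zipIdx.map (pvCase (pvMaskN cs.length m)))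
      = cs.foldl pvStepB [[]] := by
  induction cs using List.reverseRecOn with
  | nil => simp
  | append_singleton cs c ih =>
    have hn : (cs ++ [c]).length = cs.length + 1 := by simp
    rw [List.foldl_append, ← ih, hn, pow_succ, mul_comm, pv_range_double, List.map_flatMap]
    simp only [List.foldl_cons, List.foldl_nil]
    unfold pvStepB
    rw [List.flatMap_map]
    apply List.flatMap_congr
    intro q hq
    have hq' : q < 2 ^ cs.length := List.mem_range.mp hq
    have hz : (cs ++ [c]).zipIdx = cs.zipIdx ++ [(c, cs.length)] := by
      rw [List.zipIdx_append]; simp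
    have hmm := pv_mask_pos cs.length q 0 hq' (by omega)
    have hmm1 := pv_mask_pos cs.length q 1 hq' (by omega)
    have hcomm : ∀ r, r < 2 →
        ((cs ++ [c]).zipIdx.map (pvCase (pvMaskN (cs.length + 1) (2 * q + r))))
          = cs.zipIdx.map (pvCase (pvMaskN cs.length q)) ++
            [pvCase (pvMaskN (cs.length + 1) (2 * q + r)) (c, cs.length)] := by
      intro r hr
      rw [hz, List.map_append]
      congr 1
      apply List.map_congr_left
      intro p hp
      have hmem := List.mem_zipIdx hp
      have hplt : p.2 < cs.length := by
        obtain ⟨_, h2, _⟩ := hmem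
        omega
      unfold pvCase
      rw [(pv_mask_pos cs.length q r hq' hr).1 p.2 hplt]
    have hc0 : pvCase (pvMaskN (cs.length + 1) (2 * q + 0)) (c, cs.length)
        = PySem.Chars.lowerChar c := by
      unfold pvCase
      rw [hmm.2]
      simp [Nat.digitChar]
    have hc1 : pvCase (pvMaskN (cs.length + 1) (2 * q + 1)) (c, cs.length)
        = PySem.Chars.upperChar c := by
      unfold pvCase
      rw [hmm1.2]
      simp [Nat.digitChar]
    simp only [List.map_cons, List.map_nil]
    rw [show 2 * q = 2 * q + 0 by omega]
    rw [hcomm 0 (by omega)]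
    rw [show 2 * q + 0 + 1 = 2 * q + 1 by omega, hcomm 1 (by omega)]
    rw [hc0, hc1]

-- ---- assembling port A into map form ----

theorem pv_portA_eq (s : String) :
    get_op_permutation s
      = (List.range (2 ^ s.toList.length)).map
          (fun m => String.mk (s.toList.zipIdx.map (pvCase (pvMaskN s.toList.length m)))) := by
  unfold get_op_permutation
  rw [PySem.List.foldl_append_eq_flatMap
    (fun i => [String.mk ((PySem.List.enumerate s.toList 0).foldl _ [])])]
  rw [List.nil_append]
  rw [PySem.List.pyRange_one]
  have hpow : ((2 : Int) ^ s.toList.length - 0).toNat = 2 ^ s.toList.length := by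
    rw [sub_zero]
    rw [show ((2 : Int) ^ s.toList.length) = ((2 ^ s.toList.length : Nat) : Int) by push_cast; ring]
    exact Int.toNat_natCast _
  rw [hpow, List.flatMap_map]
  rw [pv_flatMap_singleton]
  apply List.map_congr_left
  intro k _
  congr 1
  have hmask : PySem.Chars.zfill
      (PySem.Chars.replace (PySem.Int.toBinChars0b ((0 : Int) + (k : Int))) ['0', 'b'] [])
      (PySem.Str.len s) = pvMaskN s.toList.length k := by
    rw [show (0 : Int) + (k : Int) = ((k : Nat) : Int) by ring]
    rw [pv_replace_0b]
    unfold pvMaskN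
    have hl : PySem.Str.len s = (s.toList.length : Int) := by
      simp [PySem.Str.len]
    rw [hl]
  rw [hmask]
  exact pv_decode_eq (pvMaskN s.toList.length k) s.toList

-- ===== VERDICT (by name: the statement is the Claim_ definition above) =====
theorem get_op_permutation_spec : Claim_equal_get_op_permutation := by
  intro s _
  unfold Spec_get_op_permutation
  have hb : get_op_permutation_alt s = (s.toList.foldl pvStepB [[]]).map String.mk := rfl
  rw [hb, pv_portA_eq, ← pv_main s.toList, List.map_map]
  rfl
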